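-- pv_equiv track=rewrite | github.com/suraj-kumar-jiscollege/excel-mind-ai | app/services/workbook_service.py | _find_duplicate_headers
-- ===== SOURCE A (Python) =====
-- def _find_duplicate_headers(headers: list[str]) -> list[str]:
--     seen: set[str] = set()
--     duplicates: list[str] = []
--     for header in headers:
--         normalized = header.strip().lower()
--         if not normalized:
--             continue
--         if normalized in seen and header not in duplicates:
--             duplicates.append(header)
--         seen.add(normalized)
--     return duplicates
-- ===== SOURCE B (Python) =====
-- def _find_duplicate_headers(headers: list[str]) -> list[str]:
--     # Pass 1: first index of each non-empty normalized header.
--     first_index: dict[str, int] = {}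
--     for i, header in enumerate(headers):
--         normalized = header.strip().lower()
--         if normalized and normalized not in first_index:
--             first_index[normalized] = i
--     # Pass 2: a header is a duplicate iff an earlier occurrence of its
--     # normalized form exists; dedup output by the exact original string.
--     duplicates: list[str] = []
--     emitted: set[str] = set()
--     for i, header in enumerate(headers):
--         normalized = header.strip().lower()
--         if not normalized:
--             continue
--         if first_index[normalized] < i and header not in emitted:
--             emitted.add(header)
--             duplicates.append(header)
--     return duplicates
-- ===== Notes on version B (the rewrite author's own statement) =====
-- stated objective: alternative
-- what changed: Replaces the single incremental seen-set pass with a two-pass decomposition: a first pass builds a dict from each normalized header to its first index, and a second pass emits a header when that first index is strictly earlier, deduplicating emitted originals with a set instead of scanning the output list.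
import Mathlib
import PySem

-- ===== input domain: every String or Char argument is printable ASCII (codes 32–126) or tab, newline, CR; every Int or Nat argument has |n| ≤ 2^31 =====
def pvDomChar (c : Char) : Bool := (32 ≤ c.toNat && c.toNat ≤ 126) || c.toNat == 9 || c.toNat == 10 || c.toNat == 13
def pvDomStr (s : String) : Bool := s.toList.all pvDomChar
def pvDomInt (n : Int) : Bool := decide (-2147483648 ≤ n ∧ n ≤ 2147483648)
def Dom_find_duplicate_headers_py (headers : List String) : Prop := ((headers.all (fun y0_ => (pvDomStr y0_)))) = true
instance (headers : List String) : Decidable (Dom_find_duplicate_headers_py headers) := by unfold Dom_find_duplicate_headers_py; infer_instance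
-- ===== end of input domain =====

-- B replaces A's single incremental seen-set pass by a two-pass decomposition
-- (first-index dict, then an emit pass with a set-based dedup of the originals);
-- same results, similar cost (objective: alternative).

-- ===== PORT A =====
-- header.strip().lower()
def pvNorm (h : String) : String := PySem.Str.lower (PySem.Str.strip h)

-- A's loop: state (seen, duplicates)
def pvLoopA : List String → PySem.Set String → List String → List String
  | [], _, duplicates => duplicates
  | header :: rest, seen, duplicates =>
    let normalized := pvNorm header
    if normalized = "" then pvLoopA rest seen duplicates
    else
      let duplicates' :=
        if seen.contains normalized && !(duplicates.contains header) then
          duplicates ++ [header]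
        else duplicates
      pvLoopA rest (seen.add normalized) duplicates'

def find_duplicate_headers_py (headers : List String) : List String :=
  pvLoopA headers PySem.Set.empty []

-- ===== PORT B =====
-- B's first pass: first_index[normalized] = first index of occurrence
def pvFirstPass : List String → Int → PySem.Dict String Int → PySem.Dict String Int
  | [], _, first_index => first_index
  | header :: rest, i, first_index =>
    let normalized := pvNorm header
    if normalized ≠ "" && !(first_index.contains normalized) then
      pvFirstPass rest (i + 1) (first_index.insert normalized i)
    else
      pvFirstPass rest (i + 1) first_index

-- B's second pass: state (emitted, duplicates).  'first_index[normalized]' is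
-- ported as getD with default i: the key is always present there, so the
-- default is never consulted.
def pvEmitPass : List String → Int → PySem.Dict String Int → PySem.Set String → List String → List String
  | [], _, _, _, duplicates => duplicates
  | header :: rest, i, first_index, emitted, duplicates =>
    let normalized := pvNorm header
    if normalized = "" then pvEmitPass rest (i + 1) first_index emitted duplicates
    else if first_index.getD normalized i < i && !(emitted.contains header) then
      pvEmitPass rest (i + 1) first_index (emitted.add header) (duplicates ++ [header])
    else
      pvEmitPass rest (i + 1) first_index emitted duplicates

def find_duplicate_headers_py_alt (headers : List String) : List String :=
  let first_index := pvFirstPass headers 0 PySem.Dict.empty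
  pvEmitPass headers 0 first_index PySem.Set.empty []

-- ===== PRECONDITION & SPEC =====
def Spec_find_duplicate_headers_py (headers : List String) (out : List String) : Prop := out = find_duplicate_headers_py_alt headers
instance (headers : List String) (out : List String) : Decidable (Spec_find_duplicate_headers_py headers out) := by unfold Spec_find_duplicate_headers_py; infer_instance

-- ===== CLAIM (what is proved, stated in full; the proofs are below) =====
def Claim_equal_find_duplicate_headers_py : Prop := ∀ (headers : List String), Dom_find_duplicate_headers_py headers → Spec_find_duplicate_headers_py headers (find_duplicate_headers_py headers)

-- ===== LEMMAS AND PROOFS =====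

-- proof-only helper: first index (counted from i) of a header whose
-- normalization is m (for nonempty m), none if absent
def pvFirstOcc : List String → Int → String → Option Int
  | [], _, _ => none
  | header :: rest, i, m =>
    if pvNorm header = m ∧ m ≠ "" then some i else pvFirstOcc rest (i + 1) m

theorem pvFirstPass_get?_some (l : List String) :
    ∀ (i : Int) (d : PySem.Dict String Int) (m : String) (v : Int),
      d.get? m = some v → (pvFirstPass l i d).get? m = some v := by
  induction l with
  | nil => intro i d m v h; simpa [pvFirstPass] using h
  | cons header rest ih =>
    intro i d m v h
    simp only [pvFirstPass]
    split
    · apply ih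
      by_cases hm : m = pvNorm header
      · subst hm
        rename_i hcond
        rw [PySem.Dict.contains_eq_isSome_get?, h] at hcond
        simp at hcond
      · rw [PySem.Dict.get?_insert_of_ne _ _ hm]
        exact h
    · exact ih _ _ _ _ h

theorem pvFirstPass_get?_none (l : List String) :
    ∀ (i : Int) (d : PySem.Dict String Int) (m : String),
      d.get? m = none → (pvFirstPass l i d).get? m = pvFirstOcc l i m := by
  induction l with
  | nil => intro i d m h; simpa [pvFirstPass, pvFirstOcc] using h
  | cons header rest ih =>
    intro i d m h
    simp only [pvFirstPass, pvFirstOcc]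
    by_cases hne : pvNorm header = ""
    · have : ¬ (pvNorm header = m ∧ m ≠ "") := by
        rintro ⟨rfl, hm2⟩; exact hm2 hne
      simp only [ne_eq, hne, not_true_eq_false, decide_false, Bool.false_and,
        Bool.false_eq_true, if_false, ih _ _ _ h]
      rw [if_neg (show ¬ ("" = m ∧ ¬ m = "") by rintro ⟨rfl, hm2⟩; exact hm2 rfl)]
    · by_cases hm : m = pvNorm header
      · subst hm
        have hc : d.contains (pvNorm header) = false := by
          rw [PySem.Dict.contains_eq_isSome_get?, h]; rfl
        simp only [ne_eq, hne, not_false_eq_true, decide_true, hc, Bool.not_false,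
          Bool.true_and, if_true]
        rw [pvFirstPass_get?_some rest _ _ _ i (PySem.Dict.get?_insert_self _ _ _)]
        simp [hne]
      · have hcond2 : ¬ (pvNorm header = m ∧ m ≠ "") := by
          rintro ⟨h1, _⟩; exact hm h1.symm
        simp only [hcond2, if_false]
        split
        · rw [ih _ _ _ (by rw [PySem.Dict.get?_insert_of_ne _ _ hm]; exact h)]
        · exact ih _ _ _ h

theorem pvFirstOcc_bounds (l : List String) :
    ∀ (i : Int) (m : String) (j : Int),
      pvFirstOcc l i m = some j → i ≤ j ∧ j < i + l.length := by
  induction l with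
  | nil => intro i m j h; simp [pvFirstOcc] at h
  | cons header rest ih =>
    intro i m j h
    simp only [pvFirstOcc] at h
    split at h
    · cases h
      simp only [List.length_cons]
      push_cast
      omega
    · have := ih (i + 1) m j h
      simp only [List.length_cons]
      push_cast
      omega

theorem pvFirstOcc_append (l1 l2 : List String) :
    ∀ (i : Int) (m : String),
      pvFirstOcc (l1 ++ l2) i m =
        ((pvFirstOcc l1 i m).orElse (fun _ => pvFirstOcc l2 (i + l1.length) m)) := by
  induction l1 with
  | nil => intro i m; simp [pvFirstOcc]
  | cons header rest ih =>
    intro i m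
    simp only [List.cons_append, pvFirstOcc]
    split
    · rfl
    · rw [ih]
      simp only [List.length_cons]
      push_cast
      ring_nf

theorem pvFirstOcc_none_iff (l : List String) :
    ∀ (i : Int) (m : String), m ≠ "" →
      (pvFirstOcc l i m = none ↔ ∀ h ∈ l, pvNorm h ≠ m) := by
  induction l with
  | nil => intro i m _; simp [pvFirstOcc]
  | cons header rest ih =>
    intro i m hm
    simp only [pvFirstOcc, List.mem_cons]
    by_cases hh : pvNorm header = m
    · simp [hh, hm]
    · have : ¬ (pvNorm header = m ∧ m ≠ "") := fun ⟨h1, _⟩ => hh h1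
      simp only [this, if_false, ih (i + 1) m hm]
      constructor
      · intro hall h hmem
        rcases hmem with rfl | hmem
        · exact hh
        · exact hall h hmem
      · intro hall h hmem
        exact hall h (Or.inr hmem)

theorem pvFirstOcc_some_mem (l : List String) :
    ∀ (i : Int) (m : String) (j : Int),
      pvFirstOcc l i m = some j → ∃ h' ∈ l, pvNorm h' = m := by
  induction l with
  | nil => intro i m j h; simp [pvFirstOcc] at h
  | cons header rest ih =>
    intro i m j h
    simp only [pvFirstOcc] at h
    split at h
    · rename_i hc; exact ⟨header, by simp, hc.1⟩
    · obtain ⟨h', hmem, heq⟩ := ih (i + 1) m j h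
      exact ⟨h', by simp [hmem], heq⟩

-- the emit condition of B equals "an earlier occurrence exists"
theorem pvEmitCond (pre : List String) (header : String) (t : List String)
    (hm : pvNorm header ≠ "") :
    ((pvFirstPass (pre ++ header :: t) 0 PySem.Dict.empty).getD (pvNorm header)
        (pre.length : Int) < (pre.length : Int))
      ↔ ∃ h' ∈ pre, pvNorm h' = pvNorm header := by
  have hget : (pvFirstPass (pre ++ header :: t) 0 PySem.Dict.empty).get? (pvNorm header)
      = pvFirstOcc (pre ++ header :: t) 0 (pvNorm header) :=
    pvFirstPass_get?_none _ _ _ _ (by simp)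
  rw [PySem.Dict.getD_eq_get?_getD, hget, pvFirstOcc_append]
  cases hpre : pvFirstOcc pre 0 (pvNorm header) with
  | none =>
    have hhead : pvFirstOcc (header :: t) (0 + (pre.length : Int)) (pvNorm header)
        = some (0 + (pre.length : Int)) := by
      simp [pvFirstOcc, hm]
    rw [pvFirstOcc_none_iff pre 0 _ hm] at hpre
    simp only [Option.orElse, hhead, Option.getD_some]
    constructor
    · intro hlt; omega
    · rintro ⟨h', hmem, heq⟩; exact absurd heq (hpre h' hmem)
  | some j =>
    simp only [Option.orElse, Option.getD_some]
    have hb := pvFirstOcc_bounds pre 0 _ j hpre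
    constructor
    · intro _
      exact pvFirstOcc_some_mem pre 0 _ j hpre
    · intro _
      omega

-- Set.contains ↔ list membership (PySem.Set is a List String)
theorem set_contains_iff (s : PySem.Set String) (x : String) :
    s.contains x = true ↔ x ∈ s := by
  simp [PySem.Set.contains]

theorem set_contains_add (s : PySem.Set String) (x y : String) :
    (PySem.Set.add s x).contains y = true ↔ y = x ∨ s.contains y = true := by
  rw [set_contains_iff, set_contains_iff, PySem.Set.mem_add]
  tauto

-- main invariant: A's loop = B's emit pass, given states in correspondence
set_option maxHeartbeats 1000000 in
theorem pvMain (rest : List String) :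
    ∀ (pre : List String) (seen : PySem.Set String) (emitted : PySem.Set String)
      (duplicates : List String),
      (∀ m, seen.contains m = true ↔ (m ≠ "" ∧ ∃ h' ∈ pre, pvNorm h' = m)) →
      (∀ h, emitted.contains h = true ↔ h ∈ duplicates) →
      pvLoopA rest seen duplicates =
        pvEmitPass rest (pre.length : Int)
          (pvFirstPass (pre ++ rest) 0 PySem.Dict.empty) emitted duplicates := by
  induction rest with
  | nil => intro pre seen emitted duplicates _ _; simp [pvLoopA, pvEmitPass]
  | cons header t ih =>
    intro pre seen emitted duplicates hseen hem
    have hpre1 : ((pre ++ [header]).length : Int) = (pre.length : Int) + 1 := by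
      simp
    have happ : (pre ++ [header]) ++ t = pre ++ header :: t := by simp
    simp only [pvLoopA, pvEmitPass]
    by_cases hm : pvNorm header = ""
    · simp only [hm, if_true]
      have hs' : ∀ m, seen.contains m = true ↔
          (m ≠ "" ∧ ∃ h' ∈ pre ++ [header], pvNorm h' = m) := by
        intro m
        rw [hseen m]
        constructor
        · rintro ⟨h1, h', hmem, heq⟩; exact ⟨h1, h', by simp [hmem], heq⟩
        · rintro ⟨h1, h', hmem, heq⟩
          rcases List.mem_append.mp hmem with hmem | hmem
          · exact ⟨h1, h', hmem, heq⟩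
          · rcases List.mem_singleton.mp hmem with rfl
            rw [hm] at heq
            exact absurd heq.symm h1
      have := ih (pre ++ [header]) seen emitted duplicates hs' hem
      rw [happ, hpre1] at this
      exact this
    · have hiff : ((pvFirstPass (pre ++ header :: t) 0 PySem.Dict.empty).getD
          (pvNorm header) (pre.length : Int) < (pre.length : Int))
            ↔ seen.contains (pvNorm header) = true := by
        rw [pvEmitCond pre header t hm, hseen]
        simp [hm]
      have hcondb : decide ((pvFirstPass (pre ++ header :: t) 0 PySem.Dict.empty).getD
          (pvNorm header) (pre.length : Int) < (pre.length : Int))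
            = seen.contains (pvNorm header) := by
        by_cases hp : ((pvFirstPass (pre ++ header :: t) 0 PySem.Dict.empty).getD
            (pvNorm header) (pre.length : Int) < (pre.length : Int))
        · rw [decide_eq_true hp, hiff.mp hp]
        · rw [decide_eq_false hp]
          cases hq : seen.contains (pvNorm header)
          · rfl
          · exact absurd (hiff.mpr hq) hp
      have hdup : duplicates.contains header = emitted.contains header := by
        by_cases hmem : header ∈ duplicates
        · have h1 : duplicates.contains header = true := by simpa using hmem
          have h2 : emitted.contains header = true := (hem header).mpr hmem
          rw [h1, h2]
        · have h1 : duplicates.contains header = false := by simpa using hmem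
          cases h2 : emitted.contains header
          · rw [h1]
          · exact absurd ((hem header).mp h2) hmem
      have hs'' : ∀ m, (seen.add (pvNorm header)).contains m = true ↔
          (m ≠ "" ∧ ∃ h' ∈ pre ++ [header], pvNorm h' = m) := by
        intro m
        rw [set_contains_add, hseen m]
        constructor
        · rintro (rfl | ⟨h1, h', hmem, heq⟩)
          · exact ⟨hm, header, by simp, rfl⟩
          · exact ⟨h1, h', by simp [hmem], heq⟩
        · rintro ⟨h1, h', hmem, heq⟩
          rcases List.mem_append.mp hmem with hmem | hmem
          · exact Or.inr ⟨h1, h', hmem, heq⟩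
          · rcases List.mem_singleton.mp hmem with rfl
            exact Or.inl heq.symm
      simp only [hm, if_false]
      rw [hcondb, ← hdup]
      cases hca : (seen.contains (pvNorm header) && !duplicates.contains header) with
      | false =>
        simp only [Bool.false_eq_true, if_false]
        have := ih (pre ++ [header]) (seen.add (pvNorm header)) emitted duplicates hs'' hem
        rw [happ, hpre1] at this
        exact this
      | true =>
        simp only [if_true]
        have hem' : ∀ h, (emitted.add header).contains h = true ↔
            h ∈ duplicates ++ [header] := by
          intro h
          rw [set_contains_add, hem h]
          simp only [List.mem_append, List.mem_singleton]
          exact or_comm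
        have := ih (pre ++ [header]) (seen.add (pvNorm header)) (emitted.add header)
          (duplicates ++ [header]) hs'' hem'
        rw [happ, hpre1] at this
        exact this

-- ===== VERDICT (by name: the statement is the Claim_ definition above) =====
theorem find_duplicate_headers_py_spec : Claim_equal_find_duplicate_headers_py := by
  intro headers _
  unfold Spec_find_duplicate_headers_py find_duplicate_headers_py find_duplicate_headers_py_alt
  have := pvMain headers [] PySem.Set.empty PySem.Set.empty []
    (by intro m; simp [set_contains_iff, PySem.Set.empty])
    (by intro h; simp [set_contains_iff, PySem.Set.empty])
  simpa using this
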